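-- pv_equiv track=rewrite | github.com/eskousbol/AdventOfCode | 2024/q9/q9a.py | compact_files
-- ===== SOURCE A (Python) =====
-- def compact_files(disk_mapping):
--   end_index = len(disk_mapping) - 1
--   start_index = 0
--
--   while start_index < end_index:
--     if disk_mapping[start_index] != '.':
--       start_index += 1
--     elif disk_mapping[end_index] == '.':
--       end_index -= 1
--     else:
--       disk_mapping[start_index] = disk_mapping[end_index]
--       disk_mapping[end_index] = '.'
--
--   return disk_mapping
-- ===== SOURCE B (Python) =====
-- def compact_files(disk_mapping):
--     k = sum(1 for x in disk_mapping if x != '.')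
--     fill = iter(x for x in reversed(disk_mapping) if x != '.')
--     for i in range(len(disk_mapping)):
--         if i >= k:
--             disk_mapping[i] = '.'
--         elif disk_mapping[i] == '.':
--             disk_mapping[i] = next(fill)
--     return disk_mapping
-- ===== Notes on version B (the rewrite author's own statement) =====
-- stated objective: alternative
-- what changed: Replaces A's inward two-pointer swap loop by a build-then-fill pass: count the non-'.' cells (k), then one forward sweep that writes '.' past position k and fills each gap before k from an iterator over the reversed non-'.' cells.
import Mathlib
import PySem

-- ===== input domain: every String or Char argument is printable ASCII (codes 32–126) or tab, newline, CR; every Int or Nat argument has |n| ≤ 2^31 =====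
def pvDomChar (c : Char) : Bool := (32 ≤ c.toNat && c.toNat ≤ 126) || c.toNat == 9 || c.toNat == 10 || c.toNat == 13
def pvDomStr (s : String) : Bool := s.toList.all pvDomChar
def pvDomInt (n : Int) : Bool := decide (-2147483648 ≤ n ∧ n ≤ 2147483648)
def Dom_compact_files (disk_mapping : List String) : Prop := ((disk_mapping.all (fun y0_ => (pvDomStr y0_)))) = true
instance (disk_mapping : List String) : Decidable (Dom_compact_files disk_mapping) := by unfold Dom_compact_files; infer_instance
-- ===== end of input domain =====

-- B replaces A's inward two-pointer loop by one forward pass fed from the reversed list of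
-- file cells (objective: alternative decomposition, same cost). Both Pythons mutate the list
-- in place and return it; the equivalence proved here is about the RETURN value.

-- ===== PORT A =====
-- A's while loop: start/end pointers; indices stay in range whenever they are read with a
-- '.'-dependent branch, so List.getD "" is exact (the "" default is never the decided value).
def loopA (d : List String) (s e : Nat) : List String :=
  if _h : s < e then
    if h1 : d.getD s "" ≠ "." then loopA d (s+1) e
    else if h2 : d.getD e "" = "." then loopA d s (e-1)
    else loopA ((d.set s (d.getD e "")).set e ".") s e
  else d
termination_by 2*(e-s) + (if d.getD s "" = "." then 1 else 0)
decreasing_by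
  · split_ifs <;> omega
  · split_ifs <;> omega
  · have hs1 : d.getD s "" = "." := not_not.mp h1
    have hslt : s < d.length := by
      by_contra hge
      rw [List.getD_eq_getElem?_getD, List.getElem?_eq_none (by omega)] at hs1
      exact absurd hs1 (by decide)
    have key : ((d.set s (d.getD e "")).set e ".").getD s "" = d.getD e "" := by
      rw [List.getD_eq_getElem?_getD, List.getElem?_set_ne (by omega : e ≠ s),
          List.getElem?_set_self hslt]
      rfl
    rw [key, if_neg h2, if_pos hs1]
    omega

def compact_files (disk_mapping : List String) : List String :=
  loopA disk_mapping 0 (disk_mapping.length - 1)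

-- ===== PORT B =====
def pvND (x : String) : Bool := x ≠ "."

-- B's forward pass: i counts positions, `files` is the iterator over the reversed non-'.'
-- cells (the [] branch of the match is Python's StopIteration, proven unreachable).
def loopB (k : Nat) : List String → List String → Nat → List String
  | [], _, _ => []
  | x :: rest, files, i =>
    if k ≤ i then "." :: loopB k rest files (i+1)
    else if x = "." then
      match files with
      | f :: fs => f :: loopB k rest fs (i+1)
      | [] => "." :: loopB k rest [] (i+1)
    else x :: loopB k rest files (i+1)

def compact_files_alt (disk_mapping : List String) : List String :=
  loopB (disk_mapping.countP pvND) disk_mapping ((disk_mapping.reverse).filter pvND) 0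

-- ===== PRECONDITION & SPEC =====
def Spec_compact_files (disk_mapping : List String) (out : List String) : Prop := out = compact_files_alt disk_mapping
instance (disk_mapping : List String) (out : List String) : Decidable (Spec_compact_files disk_mapping out) := by unfold Spec_compact_files; infer_instance

-- ===== CLAIM (what is proved, stated in full; the proofs are below) =====
def Claim_equal_compact_files : Prop := ∀ (disk_mapping : List String), Dom_compact_files disk_mapping → Spec_compact_files disk_mapping (compact_files disk_mapping)

-- ===== LEMMAS AND PROOFS =====

-- all-dot suffix: positions ≥ k are overwritten with "."
lemma loopB_dots (b : List String) (k i : Nat) (f : List String)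
    (hk : k ≤ i) (hb : ∀ x ∈ b, x = ".") : loopB k b f i = b := by
  induction b generalizing i f with
  | nil => rfl
  | cons x t ih =>
    have hx : x = "." := hb x (by simp)
    simp [loopB, if_pos (by omega : k ≤ i), hx, ih (i+1) f (by omega) (fun y hy => hb y (by simp [hy]))]

-- non-'.' prefix is kept unchanged and pops nothing
lemma loopB_keep (a : List String) (c : List String) (k i : Nat) (f : List String)
    (ha : ∀ x ∈ a, x ≠ ".") (hk : i + a.length ≤ k) :
    loopB k (a ++ c) f i = a ++ loopB k c f (i + a.length) := by
  induction a generalizing i with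
  | nil => simp
  | cons x t ih =>
    have hx : x ≠ "." := ha x (by simp)
    have h1 : ¬ k ≤ i := by simp at hk; omega
    simp only [List.cons_append, loopB, if_neg h1, if_neg hx]
    rw [ih (i+1) (fun y hy => ha y (by simp [hy])) (by simp at hk ⊢; omega)]
    simp; ring_nf

-- the crux: the result does not depend on where in the files stack, below the part that can
-- still be popped, an extra value sits — provided the cells agree up to position k
lemma loopB_congr (c1 : List String) : ∀ (c2 M P : List String) (v : String) (k i : Nat),
    c1.length = c2.length →
    c1.take (k - i) = c2.take (k - i) →
    (c1.take (k - i)).count "." ≤ M.length →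
    loopB k c1 (M ++ P) i = loopB k c2 (M ++ v :: P) i := by
  induction c1 with
  | nil =>
    intro c2 M P v k i hlen _ _
    have : c2 = [] := by simpa using hlen.symm
    simp [this, loopB]
  | cons x1 t1 ih =>
    intro c2 M P v k i hlen htake hcnt
    obtain ⟨x2, t2, rfl⟩ : ∃ y t, c2 = y :: t := by
      cases c2 with
      | nil => simp at hlen
      | cons y t => exact ⟨y, t, rfl⟩
    have hlen' : t1.length = t2.length := by simpa using hlen
    by_cases hki : k ≤ i
    · have h0 : k - i = 0 := by omega
      have h1 : k - (i+1) = 0 := by omega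
      simp only [loopB, if_pos hki]
      rw [ih t2 M P v k (i+1) hlen' (by simp [h1]) (by simp [h1])]
    · have hpos : k - i = (k - (i+1)) + 1 := by omega
      rw [hpos] at htake hcnt
      simp only [List.take_succ_cons] at htake hcnt
      have hx : x1 = x2 := by exact (List.cons.injEq _ _ _ _ ▸ htake).1
      have htake' : t1.take (k - (i+1)) = t2.take (k - (i+1)) := (List.cons.injEq _ _ _ _ ▸ htake).2
      by_cases hdot : x1 = "."
      · have hM : 1 + (t1.take (k - (i+1))).count "." ≤ M.length := by
          simpa [hdot, List.count_cons, add_comm] using hcnt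
        obtain ⟨m, M', rfl⟩ : ∃ m M', M = m :: M' := by
          cases M with
          | nil => simp at hM
          | cons m M' => exact ⟨m, M', rfl⟩
        simp only [loopB, if_neg hki, hdot, ← hx, List.cons_append]
        rw [ih t2 M' P v k (i+1) hlen' htake' (by simp at hM ⊢; omega)]
        simp
      · have hcnt' : (t1.take (k - (i+1))).count "." ≤ M.length := by
          rw [List.count_cons] at hcnt
          simp [hdot] at hcnt; omega
        simp only [loopB, if_neg hki, ← hx, if_neg hdot]
        rw [ih t2 M P v k (i+1) hlen' htake' hcnt']

-- B is the identity on a compacted list (non-'.' block followed by '.' block)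
lemma alt_id (a b : List String) (ha : ∀ x ∈ a, x ≠ ".") (hb : ∀ x ∈ b, x = ".") :
    compact_files_alt (a ++ b) = a ++ b := by
  have hcnt : (a ++ b).countP pvND = a.length := by
    rw [List.countP_append]
    have h1 : a.countP pvND = a.length :=
      List.countP_eq_length.mpr (fun x hx => by simp [pvND, ha x hx])
    have h2 : b.countP pvND = 0 :=
      List.countP_eq_zero.mpr (fun x hx => by simp [pvND, hb x hx])
    omega
  unfold compact_files_alt
  rw [hcnt, loopB_keep a b a.length 0 _ ha (by omega)]
  rw [loopB_dots b a.length (0 + a.length) _ (by omega) hb]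

-- the two-pointer invariant forces a compacted shape once the pointers meet
lemma decomp (d : List String) : ∀ (s e : Nat),
    (∀ i (h : i < d.length), i < s → d[i] ≠ ".") →
    (∀ i (h : i < d.length), e < i → d[i] = ".") →
    e ≤ s →
    ∃ a b, d = a ++ b ∧ (∀ x ∈ a, x ≠ ".") ∧ (∀ x ∈ b, x = ".") := by
  induction d with
  | nil => exact fun _ _ _ _ _ => ⟨[], [], by simp, by simp, by simp⟩
  | cons x t ih =>
    intro s e h1 h2 hes
    by_cases hs : s = 0
    · subst hs
      have he : e = 0 := by omega
      subst he
      have ht : ∀ x ∈ t, x = "." := by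
        intro y hy
        obtain ⟨j, hj, rfl⟩ := List.getElem_of_mem hy
        have := h2 (j+1) (by simp; omega) (by omega)
        simpa using this
      by_cases hx : x = "."
      · exact ⟨[], x :: t, by simp, by simp, by
          intro y hy; rcases List.mem_cons.mp hy with h | h
          · simp [h, hx]
          · exact ht y h⟩
      · exact ⟨[x], t, by simp, by simpa using hx, ht⟩
    · have hx : x ≠ "." := h1 0 (by simp) (by omega)
      by_cases he : e = 0
      · subst he
        have ht : ∀ y ∈ t, y = "." := by
          intro y hy
          obtain ⟨j, hj, rfl⟩ := List.getElem_of_mem hy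
          have := h2 (j+1) (by simp; omega) (by omega)
          simpa using this
        exact ⟨[x], t, by simp, by simpa using hx, ht⟩
      · obtain ⟨a, b, hab, hha, hhb⟩ := ih (s-1) (e-1)
          (fun i hi his => by
            have := h1 (i+1) (by simp; omega) (by omega)
            simpa using this)
          (fun i hi hei => by
            have := h2 (i+1) (by simp; omega) (by omega)
            simpa using this)
          (by omega)
        exact ⟨x :: a, b, by simp [hab], by
          intro y hy; rcases List.mem_cons.mp hy with h | h
          · simp [h, hx]
          · exact hha y h, hhb⟩

-- B's value is untouched by one move of A (the heart of the equivalence)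
lemma alt_move (d : List String) (s e : Nat)
    (hse : s < e) (helen : e < d.length)
    (h1 : ∀ i (h : i < d.length), i < s → d[i] ≠ ".")
    (h2 : ∀ i (h : i < d.length), e < i → d[i] = ".")
    (hs : d[s]'(by omega) = ".") (hv : d[e]'helen ≠ ".") :
    compact_files_alt ((d.set s (d[e]'helen)).set e ".") = compact_files_alt d := by
  set v := d[e]'helen with hvdef
  set A0 := d.take s with hA0def
  set Mid := (d.drop (s+1)).take (e - (s+1)) with hMiddef
  set Suf := d.drop (e+1) with hSufdef
  have hlenA0 : A0.length = s := by simp [hA0def]; omega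
  have hlenMid : Mid.length = e - (s+1) := by simp [hMiddef]; omega
  -- structural decomposition of d around positions s and e
  have hd : d = A0 ++ "." :: (Mid ++ v :: Suf) := by
    conv_lhs => rw [← List.take_append_drop s d]
    rw [List.drop_eq_getElem_cons (by omega : s < d.length), hs]
    congr 1
    congr 1
    conv_lhs => rw [← List.take_append_drop (e - (s+1)) (d.drop (s+1))]
    rw [← hMiddef]
    congr 1
    rw [List.drop_drop]
    have : s + 1 + (e - (s+1)) = e := by omega
    rw [this, List.drop_eq_getElem_cons (by omega : e < d.length)]
  have hd' : (d.set s v).set e "." = A0 ++ v :: (Mid ++ "." :: Suf) := by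
    conv_lhs => rw [hd]
    rw [show (A0 ++ "." :: (Mid ++ v :: Suf)).set s v
          = A0 ++ (("." :: (Mid ++ v :: Suf)).set 0 v) by
        rw [List.set_append_right _ _ (by omega), hlenA0]; simp]
    simp only [List.set_cons_zero]
    rw [List.set_append_right _ _ (by omega : A0.length ≤ e), hlenA0]
    have : e - s = Mid.length + 1 := by omega
    rw [this, List.set_cons_succ]
    rw [List.set_append_right _ _ (Nat.le_refl _), Nat.sub_self]
    simp
  -- contents of the blocks
  have hA0 : ∀ x ∈ A0, x ≠ "." := by
    intro y hy
    rw [hA0def] at hy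
    obtain ⟨i, hi, rfl⟩ := List.getElem_of_mem hy
    rw [List.getElem_take]
    exact h1 i (by simp at hi; omega) (by simp at hi; omega)
  have hSuf : ∀ x ∈ Suf, x = "." := by
    intro y hy
    rw [hSufdef] at hy
    obtain ⟨i, hi, rfl⟩ := List.getElem_of_mem hy
    rw [List.getElem_drop]
    exact h2 (e+1+i) (by simp at hi; omega) (by omega)
  set M0 := Mid.filter pvND with hM0def
  have hM0le : M0.length ≤ Mid.length := by
    rw [hM0def]; exact List.length_filter_le _ _
  -- the filtered file lists of d and of the moved list
  have hfA0 : A0.filter pvND = A0 :=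
    List.filter_eq_self.mpr (fun x hx => by simp [pvND, hA0 x hx])
  have hfSuf : Suf.filter pvND = [] :=
    List.filter_eq_nil_iff.mpr (fun x hx => by simp [pvND, hSuf x hx])
  have hpvv : pvND v = true := by simp [pvND, hv]
  have hfdot : ¬ pvND "." = true := by decide
  have hfd : d.filter pvND = A0 ++ (M0 ++ [v]) := by
    rw [hd, List.filter_append, hfA0, List.filter_cons_of_neg hfdot, List.filter_append,
        ← hM0def, List.filter_cons_of_pos hpvv, hfSuf]
  have hfd' : ((d.set s v).set e ".").filter pvND = A0 ++ (v :: M0) := by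
    rw [hd', List.filter_append, hfA0, List.filter_cons_of_pos hpvv, List.filter_append,
        ← hM0def, List.filter_cons_of_neg hfdot, hfSuf]
    simp
  have hk : d.countP pvND = s + (M0.length + 1) := by
    rw [List.countP_eq_length_filter, hfd]; simp [hlenA0]; try omega
  have hk' : ((d.set s v).set e ".").countP pvND = s + (M0.length + 1) := by
    rw [List.countP_eq_length_filter, hfd']; simp [hlenA0]; try omega
  set k := s + (M0.length + 1) with hkdef
  -- both runs, unfolded past the common non-'.' prefix and position s
  unfold compact_files_alt
  rw [hk, hk', List.filter_reverse, List.filter_reverse, hfd, hfd']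
  conv_lhs => rw [hd']
  conv_rhs => rw [hd]
  rw [show (A0 ++ (v :: M0)).reverse = M0.reverse ++ v :: A0.reverse by simp]
  rw [show (A0 ++ (M0 ++ [v])).reverse = v :: (M0.reverse ++ A0.reverse) by simp]
  rw [loopB_keep A0 _ k 0 _ hA0 (by omega), loopB_keep A0 _ k 0 _ hA0 (by omega)]
  simp only [Nat.zero_add, hlenA0]
  congr 1
  have hks : ¬ k ≤ s := by omega
  rw [show loopB k (v :: (Mid ++ "." :: Suf)) (M0.reverse ++ v :: A0.reverse) s
        = v :: loopB k (Mid ++ "." :: Suf) (M0.reverse ++ v :: A0.reverse) (s+1) by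
      simp [loopB, hks, hv]]
  rw [show loopB k ("." :: (Mid ++ v :: Suf)) (v :: (M0.reverse ++ A0.reverse)) s
        = v :: loopB k (Mid ++ v :: Suf) (M0.reverse ++ A0.reverse) (s+1) by
      simp [loopB, hks]]
  congr 1
  have hki : k - (s+1) = M0.length := by omega
  have htk : ∀ y : String, (Mid ++ y :: Suf).take (k - (s+1)) = Mid.take M0.length := by
    intro y
    rw [hki, List.take_append, Nat.sub_eq_zero_of_le hM0le]
    simp
  exact (loopB_congr (Mid ++ v :: Suf) (Mid ++ "." :: Suf) M0.reverse A0.reverse v k (s+1)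
    (by simp) (by rw [htk, htk]) (by
      rw [htk]
      calc (Mid.take M0.length).count "." ≤ (Mid.take M0.length).length :=
            List.count_le_length
        _ ≤ M0.length := by simp
        _ = M0.reverse.length := by simp)).symm

-- main loop lemma
lemma loopA_eq (d : List String) (s e : Nat)
    (h1 : ∀ i (h : i < d.length), i < s → d[i] ≠ ".")
    (h2 : ∀ i (h : i < d.length), e < i → d[i] = ".")
    (h3 : e < d.length ∨ d.length = 0) :
    loopA d s e = compact_files_alt d := by
  induction d, s, e using loopA.induct with
  | case1 d s e hse hnd ih =>
    rw [loopA, dif_pos hse, dif_pos hnd]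
    refine ih ?_ h2 h3
    intro i hi his
    rcases Nat.lt_or_ge i s with h | h
    · exact h1 i hi h
    · have : i = s := by omega
      subst this
      rw [List.getD_eq_getElem?_getD, List.getElem?_eq_getElem hi] at hnd
      simpa using hnd
  | case2 d s e hse hnd hdot ih =>
    rw [loopA, dif_pos hse, dif_neg hnd, dif_pos hdot]
    refine ih h1 ?_ (by omega)
    intro i hi hei
    rcases Nat.lt_or_ge e i with h | h
    · exact h2 i hi h
    · have : i = e := by omega
      subst this
      rw [List.getD_eq_getElem?_getD, List.getElem?_eq_getElem hi] at hdot
      simpa using hdot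
  | case3 d s e hse hnd hdot ih =>
    have hsd : d.getD s "" = "." := not_not.mp hnd
    have hslt : s < d.length := by
      by_contra hge
      rw [List.getD_eq_getElem?_getD, List.getElem?_eq_none (by omega)] at hsd
      exact absurd hsd (by decide)
    have helen : e < d.length := by omega
    have hs : d[s]'(by omega) = "." := by
      rw [List.getD_eq_getElem?_getD, List.getElem?_eq_getElem hslt] at hsd
      simpa using hsd
    have hvD : d.getD e "" = d[e]'helen := by
      rw [List.getD_eq_getElem?_getD, List.getElem?_eq_getElem helen]; rfl
    have hv : d[e]'helen ≠ "." := by rw [← hvD]; exact hdot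
    rw [loopA, dif_pos hse, dif_neg hnd, dif_neg hdot]
    rw [hvD] at ih ⊢
    have hget' : ∀ i (h : i < d.length), i ≠ s → i ≠ e →
        ((d.set s (d[e]'helen)).set e ".")[i]'(by simp; omega) = d[i] := by
      intro i hi his hie
      rw [List.getElem_set_ne (by omega : e ≠ i), List.getElem_set_ne (by omega : s ≠ i)]
    have := ih (fun i hi his => by
        rw [hget' i (by simp at hi; omega) (by omega) (by simp at hi; omega)]
        exact h1 i (by simp at hi; omega) his)
      (fun i hi hei => by
        rcases Nat.lt_or_ge e i with h | h
        · rw [hget' i (by simp at hi; omega) (by omega) (by omega)]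
          exact h2 i (by simp at hi; omega) h
        · omega)
      (by simp; omega)
    rw [this]
    exact alt_move d s e hse helen h1 h2 hs hv
  | case4 d s e hse =>
    rw [loopA, dif_neg hse]
    obtain ⟨a, b, hab, ha, hb⟩ := decomp d s e h1 h2 (by omega)
    rw [hab]
    exact (alt_id a b ha hb).symm

-- ===== VERDICT (by name: the statement is the Claim_ definition above) =====
theorem compact_files_spec : Claim_equal_compact_files := by
  intro d _
  unfold Spec_compact_files compact_files
  exact loopA_eq d 0 (d.length - 1) (by omega) (fun i h hi => by omega)
    (by rcases Nat.eq_zero_or_pos d.length with h | h <;> omega)
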